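-- pv_equiv track=rewrite | github.com/kawazaki0/adventofcode2018 | day2/main.py | solution_first
-- ===== SOURCE A (Python) =====
-- from collections import defaultdict
-- from itertools import groupby
--
-- def solution_first(input_text):
--     """
--     >>> solution_first(['abcdef', 'bababc', 'abbcde', 'abcccd', 'aabcdd', 'abcdee', 'ababab'])
--     12
--     """
--     count = defaultdict(lambda: 0)
--     for line in input_text:
--         count_line = defaultdict(lambda: 0)
--         for letter, group in groupby(sorted(line)):
--             letter_count = len(list(group))
--             if letter_count in [2, 3] and count_line[letter_count] == 0:
--                 count_line[letter_count] = 1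
--         count[2] += count_line[2]
--         count[3] += count_line[3]
--
--     return count[2] * count[3]
-- ===== SOURCE B (Python) =====
-- def _has_exact(chars, k):
--     return any(chars.count(ch) == k for ch in set(chars))
--
--
-- def solution_first(input_text):
--     lines = [list(line) for line in input_text]
--     twos = sum(1 for chars in lines if _has_exact(chars, 2))
--     threes = sum(1 for chars in lines if _has_exact(chars, 3))
--     return twos * threes
-- ===== Notes on version B (the rewrite author's own statement) =====
-- stated objective: alternative
-- what changed: A makes one pass over the lines maintaining two defaultdicts, sorting each line and walking itertools.groupby runs with a flag-dict per line; B builds no frequency structure at all: it tests 'some character occurs exactly k times' by rescanning the line with list.count over its distinct characters, and computes the two line-counts in two staged sum() passes instead of one dict-updating loop.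
import Mathlib
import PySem

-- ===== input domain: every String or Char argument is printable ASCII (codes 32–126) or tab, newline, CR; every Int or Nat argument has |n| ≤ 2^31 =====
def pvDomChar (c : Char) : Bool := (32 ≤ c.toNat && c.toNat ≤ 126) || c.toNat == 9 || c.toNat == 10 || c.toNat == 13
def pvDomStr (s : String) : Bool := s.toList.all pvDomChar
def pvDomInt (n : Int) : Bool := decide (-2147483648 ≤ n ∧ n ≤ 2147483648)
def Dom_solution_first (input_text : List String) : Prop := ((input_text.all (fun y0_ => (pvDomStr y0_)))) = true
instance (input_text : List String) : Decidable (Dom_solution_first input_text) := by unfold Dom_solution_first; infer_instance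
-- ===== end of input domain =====

-- B drops A's per-line sort+groupby and the two defaultdicts: it tests "some char occurs exactly k
-- times" by rescanning the line with list.count over its distinct chars, in two staged passes (alternative).


-- ===== PORT A =====
-- itertools.groupby over a list: consecutive runs as (key, run length); exact for a list argument
def pyGroupBy : List Char → List (Char × Int)
  | [] => []
  | c :: rest =>
      (c, 1 + ((rest.takeWhile (· == c)).length : Int)) ::
        pyGroupBy (rest.dropWhile (· == c))
termination_by l => l.length
decreasing_by
  simp only [List.length_cons]
  exact Nat.lt_succ_of_le (List.Sublist.length_le (List.dropWhile_sublist _))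

def solution_first (input_text : List String) : Int :=
  let count := input_text.foldl
    (fun (count : PySem.Dict Int Int) line =>
      let count_line := (pyGroupBy (PySem.List.sorted line.toList (fun c => c) false)).foldl
        (fun (count_line : PySem.Dict Int Int) g =>
          let letter_count := g.2
          if (letter_count = 2 ∨ letter_count = 3) ∧ count_line.getD letter_count 0 = 0 then
            count_line.insert letter_count 1
          else count_line)
        PySem.Dict.empty
      let count := count.insert 2 (count.getD 2 0 + count_line.getD 2 0)
      count.insert 3 (count.getD 3 0 + count_line.getD 3 0))
    PySem.Dict.empty
  count.getD 2 0 * count.getD 3 0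

-- ===== PORT B =====
-- _has_exact(chars, k): any(chars.count(ch) == k for ch in set(chars))
def hasExact (chars : List Char) (k : Int) : Bool :=
  (PySem.Set.ofList chars).any (fun ch => (PySem.List.count chars ch : Int) == k)

def solution_first_alt (input_text : List String) : Int :=
  let lines := input_text.map (fun line => line.toList)
  let twos : Int := ((lines.filter (fun chars => hasExact chars 2)).length : Int)
  let threes : Int := ((lines.filter (fun chars => hasExact chars 3)).length : Int)
  twos * threes

-- ===== PRECONDITION & SPEC =====
def Spec_solution_first (input_text : List String) (out : Int) : Prop := out = solution_first_alt input_text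
instance (input_text : List String) (out : Int) : Decidable (Spec_solution_first input_text out) := by unfold Spec_solution_first; infer_instance

-- ===== CLAIM (what is proved, stated in full; the proofs are below) =====
def Claim_equal_solution_first : Prop := ∀ (input_text : List String), Dom_solution_first input_text → Spec_solution_first input_text (solution_first input_text)

-- ===== LEMMAS AND PROOFS =====

-- B's existence test, characterised by counts of the line
theorem hasExact_iff (xs : List Char) (k : Int) :
    hasExact xs k = true ↔ ∃ c, c ∈ xs ∧ (xs.count c : Int) = k := by
  unfold hasExact
  rw [List.any_eq_true]
  constructor
  · rintro ⟨c, hc, hfc⟩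
    exact ⟨c, by simpa [PySem.Set.mem_ofList] using hc, by simpa [PySem.List.count_eq] using hfc⟩
  · rintro ⟨c, hc, hfc⟩
    exact ⟨c, by simpa [PySem.Set.mem_ofList] using hc, by simpa [PySem.List.count_eq] using hfc⟩

-- A's inner flag-dict fold, characterised by 'some group has length k' (k = 2 or 3)
theorem flag_fold (k : Int) (hk : k = 2 ∨ k = 3) :
    ∀ (gs : List (Char × Int)) (d : PySem.Dict Int Int),
      ((gs.foldl (fun (cl : PySem.Dict Int Int) g =>
          if (g.2 = 2 ∨ g.2 = 3) ∧ cl.getD g.2 0 = 0 then cl.insert g.2 1 else cl) d).getD k 0)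
        = if d.getD k 0 = 0 then (if gs.any (fun g => g.2 == k) then 1 else 0) else d.getD k 0 := by
  intro gs
  induction gs with
  | nil => intro d; simp
  | cons g t ih =>
    intro d
    by_cases hcond : (g.2 = 2 ∨ g.2 = 3) ∧ d.getD g.2 0 = 0
    · by_cases hgk : g.2 = k
      · subst hgk
        simp only [List.foldl_cons, if_pos hcond, ih, PySem.Dict.getD_insert]
        simp [hcond.2]
      · simp only [List.foldl_cons, if_pos hcond, ih, PySem.Dict.getD_insert, if_neg (fun (h : k = g.2) => hgk h.symm)]
        simp [List.any_cons, hgk]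
    · by_cases hd : d.getD k 0 = 0
      · have hgk : ¬ g.2 = k := by
          intro h; exact hcond ⟨by rcases hk with h2 | h3 <;> [left; right] <;> omega, by rwa [h]⟩
        simp only [List.foldl_cons, if_neg hcond, ih]
        simp [hd, List.any_cons, hgk]
      · simp only [List.foldl_cons, if_neg hcond, ih]
        simp [hd]

-- groups of a ≤-sorted list have length k iff some element occurs exactly k times
theorem groupby_any_sorted (k : Int) :
    ∀ (l : List Char), l.Pairwise (· ≤ ·) →
      (((pyGroupBy l).any (fun g => g.2 == k)) = true ↔ ∃ c, c ∈ l ∧ (l.count c : Int) = k) := by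
  intro l
  induction l using pyGroupBy.induct with
  | case1 => simp [pyGroupBy]
  | case2 c rest ih =>
    intro hsort
    have hrest : rest.Pairwise (· ≤ ·) := hsort.of_cons
    have hle : ∀ x ∈ rest, c ≤ x := (List.pairwise_cons.mp hsort).1
    set tw := rest.takeWhile (· == c) with htw
    set dw := rest.dropWhile (· == c) with hdw
    have hsplit : tw ++ dw = rest := List.takeWhile_append_dropWhile
    have htwc : ∀ x ∈ tw, x = c := by
      intro x hx
      have := List.mem_takeWhile_imp hx
      simpa using this
    have hdsub : dw.Sublist rest := List.dropWhile_sublist _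
    have hdsort : dw.Pairwise (· ≤ ·) := hrest.sublist hdsub
    have hcdw : c ∉ dw := by
      intro hcin
      cases hdwe : dw with
      | nil => rw [hdwe] at hcin; simp at hcin
      | cons d tail =>
        rw [hdwe] at hcin
        have hdne : ((· == c) d) = false := by
          have := List.head?_dropWhile_not (· == c) rest
          rw [← hdw, hdwe] at this; simpa using this
        have hdc : d ≠ c := by simpa using hdne
        have hdmem : d ∈ rest := hdsub.mem (by rw [hdwe]; simp)
        have hcd : c ≤ d := hle d hdmem
        rcases List.mem_cons.mp hcin with h | h
        · exact hdc h.symm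
        · have hdle : d ≤ c := (List.pairwise_cons.mp (hdwe ▸ hdsort)).1 c h
          exact hdc (le_antisymm hdle hcd)
    have hcount_c : (c :: rest).count c = 1 + tw.length := by
      rw [List.count_cons_self, ← hsplit, List.count_append]
      have h1 : tw.count c = tw.length := by
        rw [List.count_eq_length]
        intro b hb; exact (htwc b hb).symm
      have h2 : dw.count c = 0 := List.count_eq_zero.mpr hcdw
      omega
    have hcount_ne : ∀ c', c' ≠ c → (c :: rest).count c' = dw.count c' := by
      intro c' hne
      have hcc : (c :: rest).count c' = rest.count c' := by
        simp [Ne.symm hne]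
      rw [hcc, ← hsplit, List.count_append]
      have : tw.count c' = 0 := by
        rw [List.count_eq_zero]; intro h; exact hne (htwc c' h)
      omega
    rw [show pyGroupBy (c :: rest)
        = (c, 1 + (tw.length : Int)) :: pyGroupBy dw from by rw [pyGroupBy]]
    rw [List.any_cons]
    constructor
    · intro h
      rcases Bool.or_eq_true_iff.mp h with h | h
      · have hek : 1 + (tw.length : Int) = k := by simpa using h
        exact ⟨c, by simp, by rw [hcount_c]; push_cast; exact hek⟩
      · rcases (ih hdsort).mp h with ⟨c', hc', hcnt⟩
        have hne : c' ≠ c := fun he => hcdw (he ▸ hc')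
        refine ⟨c', List.mem_cons_of_mem _ (hdsub.mem hc'), ?_⟩
        rw [hcount_ne c' hne]; exact hcnt
    · rintro ⟨c', hc', hcnt⟩
      by_cases hne : c' = c
      · subst hne
        apply Bool.or_eq_true_iff.mpr; left
        rw [hcount_c] at hcnt; push_cast at hcnt
        simpa using hcnt
      · apply Bool.or_eq_true_iff.mpr; right
        apply (ih hdsort).mpr
        refine ⟨c', ?_, by rw [← hcount_ne c' hne]; exact hcnt⟩
        rcases List.mem_cons.mp hc' with h | h
        · exact absurd h hne
        · rcases List.mem_append.mp (hsplit ▸ h) with h' | h'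
          · exact absurd (htwc c' h') hne
          · exact h'

-- per-line bridge: A's flag-dict entry equals B's existence test, as 0/1
theorem line_bridge (line : String) (k : Int) (hk : k = 2 ∨ k = 3) :
    ((pyGroupBy (PySem.List.sorted line.toList (fun c => c) false)).foldl
        (fun (cl : PySem.Dict Int Int) g =>
          if (g.2 = 2 ∨ g.2 = 3) ∧ cl.getD g.2 0 = 0 then cl.insert g.2 1 else cl)
        PySem.Dict.empty).getD k 0
      = if hasExact line.toList k then 1 else 0 := by
  set s := PySem.List.sorted line.toList (fun c => c) false with hs
  have hperm : s.Perm line.toList := PySem.List.sorted_perm line.toList (fun c => c) false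
  have hsort : s.Pairwise (· ≤ ·) := PySem.List.sorted_pairwise line.toList (fun c => c)
  have h1 : ((pyGroupBy s).any (fun g => g.2 == k)) = true ↔ hasExact line.toList k = true := by
    rw [groupby_any_sorted k s hsort, hasExact_iff]
    constructor
    · rintro ⟨c, hc, hcnt⟩; exact ⟨c, hperm.mem_iff.mp hc, by rw [← hperm.count_eq]; exact hcnt⟩
    · rintro ⟨c, hc, hcnt⟩; exact ⟨c, hperm.mem_iff.mpr hc, by rw [hperm.count_eq]; exact hcnt⟩
  rw [flag_fold k hk]
  have h0 : (PySem.Dict.empty : PySem.Dict Int Int).getD k 0 = 0 := rfl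
  rw [h0, if_pos rfl]
  by_cases hb : hasExact line.toList k = true
  · rw [if_pos hb, if_pos (h1.mpr hb)]
  · rw [if_neg hb, if_neg (fun h => hb (h1.mp h))]

theorem solution_first_spec : Claim_equal_solution_first := by
  intro input_text _
  unfold Spec_solution_first solution_first solution_first_alt
  simp only [List.filter_map, List.length_map]
  suffices h : ∀ (lines : List String) (d : PySem.Dict Int Int),
      ((lines.foldl
        (fun (count : PySem.Dict Int Int) line =>
          let count_line := (pyGroupBy (PySem.List.sorted line.toList (fun c => c) false)).foldl
            (fun (count_line : PySem.Dict Int Int) g =>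
              let letter_count := g.2
              if (letter_count = 2 ∨ letter_count = 3) ∧ count_line.getD letter_count 0 = 0 then
                count_line.insert letter_count 1
              else count_line)
            PySem.Dict.empty
          let count := count.insert 2 (count.getD 2 0 + count_line.getD 2 0)
          count.insert 3 (count.getD 3 0 + count_line.getD 3 0)) d).getD 2 0,
       (lines.foldl
        (fun (count : PySem.Dict Int Int) line =>
          let count_line := (pyGroupBy (PySem.List.sorted line.toList (fun c => c) false)).foldl
            (fun (count_line : PySem.Dict Int Int) g =>
              let letter_count := g.2
              if (letter_count = 2 ∨ letter_count = 3) ∧ count_line.getD letter_count 0 = 0 then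
                count_line.insert letter_count 1
              else count_line)
            PySem.Dict.empty
          let count := count.insert 2 (count.getD 2 0 + count_line.getD 2 0)
          count.insert 3 (count.getD 3 0 + count_line.getD 3 0)) d).getD 3 0)
      = (d.getD 2 0 + ((lines.filter (fun line => hasExact line.toList 2)).length : Int),
         d.getD 3 0 + ((lines.filter (fun line => hasExact line.toList 3)).length : Int)) by
    have := h input_text PySem.Dict.empty
    rw [Prod.mk.injEq] at this
    rw [this.1, this.2]
    have h0 : (PySem.Dict.empty : PySem.Dict Int Int).getD 2 0 = 0 := rfl
    have h0' : (PySem.Dict.empty : PySem.Dict Int Int).getD 3 0 = 0 := rfl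
    rw [h0, h0', zero_add, zero_add]
    rfl
  intro lines
  induction lines with
  | nil => intro d; simp
  | cons line t ih =>
    intro d
    simp only [List.foldl_cons]
    rw [ih]
    rw [line_bridge line 2 (Or.inl rfl), line_bridge line 3 (Or.inr rfl)]
    simp only [PySem.Dict.getD_insert]
    rw [Prod.mk.injEq]
    by_cases h2 : hasExact line.toList 2 <;>
      by_cases h3 : hasExact line.toList 3 <;>
        refine ⟨?_, ?_⟩ <;> simp [h2, h3] <;> try ring
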